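/- GENERATED by tools/from_farm_form.py from prooffarm-gif/accepted/prog_main.E/Proof.lean (a worked proof of the farm's unit `prog_main.E`,
   accepted by the verdict) — do not edit. -/
import Gif.Spec.Units.prog_main_E
import Gif.Spec.AllSegs

open X86 X86.User Asan ProgX.Base ProgX.Base.Spec Gif.Spec

/-!
  `prog_main.E` (0x105082 … the `ret` at 0x1050a3, 8 instructions; gif_driver.c:246 / 259): THE EPILOGUE OF THE DRIVER'S TOP FUNCTION,
  a protected frame at HEAP LEVEL. The contract's post is `True` and the contract's footprint contains the whole shadow region
  (`[800000H, 1000020H)`), so neither `after_epilogue` nor `epilogue_same` is needed: the two shadow-clearing stores stay in the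
  footprint. The blocks below:
    1. the prelude: the entry assertion `Done` (= `Core`, never destructured: its `>>> 3` field stays out of the walk) as walker
       facts; the shadow index register `rbx` as a word VARIABLE `b` with bounds;
    2. the walk to the `ret` (the four pops and the return address are read through the two shadow stores by the walker itself);
    3. `Returned`, field by field: `same` from `Core.same` with `shadowSpan` unfolded, by `u_same`.
-/

/-- The epilogue of `prog_main` takes `Done` at 0x105082 to the contract's `Returned`. -/
theorem Gif.Spec.Proved.prog_main_E_ok : Gif.Spec.prog_main_E.Statement := by
  intro Lay hLay μ hμ u₀ hcode H rest frames e ret v hat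
  -- 1. THE PRELUDE: `Done` is `Core` at the cut 0x105082; `Core` stays whole (driver.md T-c)
  obtain ⟨hcore⟩ := hat
  have he := hcore.entry
  v_entry he
  -- what the walker reads of a segment's entry state: rip, rsp (as `c_rsp`), the registers kept, the text, DF / MXCSR
  have w_rip := hcore.rip
  have c_rsp : v.reg .rsp = e.reg .rsp - 168 := hcore.rsp
  have w_kept : RegsKept [.rsp] v v := RegsKept.refl _ _
  have w_eq : Mem.EqOn ProgX.Base.L.textLo ProgX.Base.L.textHi u₀.mem v.mem := ProgX.Base.conv_code_eqOn hcore.code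
  have hdf := (show abiInv _ from hcore.abi).1
  have hmx := (show abiInv _ from hcore.abi).2
  have hsse := ProgX.Base.sseOK_of_abiInv hcore.abi
  -- the slots the four pops (0x10509d … 0x1050a1) and the `ret` (0x1050a3) read
  have k_r13 : v.mem.readLE (e.reg .rsp - 8) 8 = (e.reg .r13).toNat := hcore.slot_r13
  have k_r12 : v.mem.readLE (e.reg .rsp - 16) 8 = (e.reg .r12).toNat := hcore.slot_r12
  have k_rbp : v.mem.readLE (e.reg .rsp - 24) 8 = (e.reg .rbp).toNat := hcore.slot_rbp
  have k_rbx : v.mem.readLE (e.reg .rsp - 32) 8 = (e.reg .rbx).toNat := hcore.slot_rbx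
  have k_ra : UInt64.ofNat (v.mem.readLE (e.reg .rsp) 8) = ret := hcore.slot_ra
  -- THE SHADOW INDEX REGISTER AS A VARIABLE `b` WITH BOUNDS: no `>>> 3` is in the walk's context
  have e168 : (e.reg .rsp - 168).toNat = (e.reg .rsp).toNat - 168 := by
    u_omega
  obtain ⟨b, hb⟩ : ∃ b : Word, b = (e.reg .rsp - 168) >>> 3 := ⟨_, rfl⟩
  have hbn : b.toNat = ((e.reg .rsp).toNat - 168) / 8 := by
    rw [hb, Asan.toNat_shr3, e168]
  have hb1 : 0xE0000 ≤ b.toNat := by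
    omega
  have hb2 : b.toNat + 16 ≤ 0x100000 := by
    omega
  have c_rbx : v.reg .rbx = b := by
    rw [hb]
    exact hcore.rbx
  clear hb
  -- 2. THE WALK: 0x105082 `mov dword [rbx + C00000H], 0`, 0x10508c `mov dword [rbx + C0000CH], 0` (gif_driver.c:246: the frame's
  --    shadow is clean again), 0x105096 `add rsp, 136`, four pops, `ret` (gif_driver.c:259): no side goal is left
  u_walk hcode [hμ.vendor] span [ProgX.Base.L.textLo, ProgX.Base.L.textHi] side (v_side)
  -- the carried footprint with the frame's shadow span as a literal window (`u_same` does not see through `shadowSpan`)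
  have hsame0 := hcore.same
  simp only [shadowSpan] at hsame0
  -- 3. `Returned`, field by field
  refine ReachVia.done ?_
  refine X86.User.Returned.mk w_rip w_rsp ?saved ?same (ProgX.Base.conv_code_in w_eq) ?abi ?post
  case saved =>
    -- the popped registers are the walker's facts; `r14 r15` were never touched: `Core.r14`, `Core.r15`
    intro r hr
    cases r <;> first
      | exact absurd hr (by decide)
      | (with_reducible assumption)
      | exact (w_kept _ rfl).trans hcore.r14
      | exact (w_kept _ rfl).trans hcore.r15
  case same =>
    -- the two shadow stores and the frame's shadow span lie inside the contract's window `[800000H, 1000020H)`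
    simp only [X86.User.Spec.footprint, vspec]
    rw [w_mem]
    u_same
  case abi =>
    -- DF and MXCSR by hand (`v_inv` is slow behind a walk with shadow stores)
    refine ProgX.Base.abiInv_of ?_ ?_
    · rw [w_flags]
      simp only [X86.User.df_setStatus]
      exact hdf
    · rw [w_mxcsr]
      exact hmx
  case post =>
    -- the contract's post is `True`
    trivial
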